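-- pv_equiv track=rewrite | github.com/akulacsathish-eng/test3 | part2_support.py | recover_part1_password
-- ===== SOURCE A (Python) =====
-- from dataclasses import dataclass
-- from typing import Dict, List, Sequence, Tuple
--
-- @dataclass
-- class Node:
--     valid: int
--     contributes: int
--     position: int
--     row_index: int
--     col_disp: int
--     noise: int
--     col_val: int
--
-- def compute_seed(student_id: str) -> int:
--     digits = "".join(ch for ch in student_id if ch.isdigit())
--     if not digits:
--         return 0
--     return (int(digits) * 1664525 + 1013904223) & 0x7FFFFFFF
--
-- def lcg_next(state: int) -> int:
--     return (state * 1664525 + 1013904223) & 0x7FFFFFFF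
--
-- def generate_part1_vault(seed: int) -> List[List[str]]:
--     state = seed
--     vault = [["?" for _ in range(12)] for _ in range(8)]
--     for row in range(8):
--         for col in range(12):
--             state = lcg_next(state)
--             vault[row][col] = chr(ord("A") + (state % 26))
--     return vault
--
-- def generate_part1_nodes(seed: int) -> List[Node]:
--     state = seed
--     state = lcg_next(state)
--     length = 6 + (state % 5)
--     nodes: List[Node] = []
--     for index in range(length):
--         state = lcg_next(state)
--         row_index = state % 8
--         state = lcg_next(state)
--         col_val = state % 12
--         state = lcg_next(state)
--         low = state
--         state = lcg_next(state)
--         high = state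
--         noise = (high << 32) | low
--         nodes.append(
--             Node(
--                 valid=1,
--                 contributes=1,
--                 position=index,
--                 row_index=row_index,
--                 col_disp=24,
--                 noise=noise,
--                 col_val=col_val,
--             )
--         )
--     return nodes
--
-- def recover_part1_password(student_id: str) -> str:
--     seed = compute_seed(student_id)
--     vault = generate_part1_vault(seed)
--     nodes = generate_part1_nodes(seed)
--     out = ["?"] * len(nodes)
--     for node in nodes:
--         if node.valid and node.contributes:
--             out[node.position] = vault[node.row_index][node.col_val]
--     return "".join(out)
-- ===== SOURCE B (Python) =====
-- def compute_seed(student_id: str) -> int: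
--     digits = "".join(ch for ch in student_id if ch.isdigit())
--     if not digits:
--         return 0
--     return (int(digits) * 1664525 + 1013904223) & 0x7FFFFFFF
--
-- def lcg_next(state: int) -> int:
--     return (state * 1664525 + 1013904223) & 0x7FFFFFFF
--
-- def recover_part1_password(student_id: str) -> str:
--     # One flat LCG-state chain; no vault matrix, no Node objects, no noise draws.
--     seed = compute_seed(student_id)
--     states = [seed]
--     for _ in range(96):
--         states.append(lcg_next(states[-1]))
--     length = 6 + states[1] % 5
--     chars = []
--     for k in range(length):
--         row = states[2 + 4 * k] % 8
--         col = states[3 + 4 * k] % 12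
--         chars.append(chr(ord("A") + states[row * 12 + col + 1] % 26))
--     return "".join(chars)
-- ===== Notes on version B (the rewrite author's own statement) =====
-- stated objective: simpler
-- what changed: B replaces A's 8x12 vault matrix and per-index Node objects by one flat list of 97 LCG states, reading each password character directly as states[row*12+col+1] and skipping the unused noise/low/high bookkeeping entirely.
import Mathlib
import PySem

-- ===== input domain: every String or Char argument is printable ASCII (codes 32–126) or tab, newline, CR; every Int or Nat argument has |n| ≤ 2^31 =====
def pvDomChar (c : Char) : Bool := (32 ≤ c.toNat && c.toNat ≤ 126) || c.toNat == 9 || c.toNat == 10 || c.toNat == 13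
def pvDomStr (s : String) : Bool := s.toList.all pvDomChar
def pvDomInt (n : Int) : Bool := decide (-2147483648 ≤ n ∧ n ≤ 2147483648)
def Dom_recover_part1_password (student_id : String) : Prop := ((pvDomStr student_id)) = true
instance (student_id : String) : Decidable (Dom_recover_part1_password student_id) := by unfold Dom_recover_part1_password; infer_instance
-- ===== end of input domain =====

-- B replaces A's 8×12 vault matrix and Node objects by one flat list of LCG states:
-- cell (r,c) is state r*12+c+1 and each node consumes 4 states, so the password is read
-- directly off the state chain (objective: simpler; the unused noise/low/high draws vanish).

-- shared helpers: compute_seed and lcg_next appear verbatim in both Source A and Source B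
def lcg_next (state : Int) : Int :=
  PySem.Int.band (state * 1664525 + 1013904223) 0x7FFFFFFF

def compute_seed (student_id : String) : Int :=
  let digits := student_id.toList.filter (fun ch => PySem.Chars.isdigit ch)
  if digits = [] then 0
  else
    -- int(digits): `none` is unreachable (digits is a nonempty all-digit string)
    match PySem.Int.ofChars? digits with
    | some n => PySem.Int.band (n * 1664525 + 1013904223) 0x7FFFFFFF
    | none => 0

-- ===== PORT A =====
structure Node where
  valid : Int
  contributes : Int
  position : Int
  row_index : Int
  col_disp : Int
  noise : Int
  col_val : Int
deriving DecidableEq, Repr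

def generate_part1_vault (seed : Int) : List (List String) :=
  let init : List (List String) := List.replicate 8 (List.replicate 12 "?")
  ((PySem.List.pyRange 0 8 1).foldl (fun (acc : Int × List (List String)) row =>
    (PySem.List.pyRange 0 12 1).foldl (fun (acc2 : Int × List (List String)) col =>
      let state := lcg_next acc2.1
      -- vault[row][col] = chr(ord("A") + (state % 26))  (row, col in range by construction)
      (state, acc2.2.set row.toNat ((PySem.List.pyGetD acc2.2 row []).set col.toNat
        (String.mk [Char.ofNat (65 + PySem.Int.mod state 26).toNat])))) acc)
   (seed, init)).2

def generate_part1_nodes (seed : Int) : List Node :=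
  let state1 := lcg_next seed
  let length := 6 + PySem.Int.mod state1 5
  ((PySem.List.pyRange 0 length 1).foldl (fun (acc : Int × List Node) index =>
    let s1 := lcg_next acc.1
    let s2 := lcg_next s1
    let s3 := lcg_next s2
    let s4 := lcg_next s3
    (s4, acc.2 ++ [⟨1, 1, index, PySem.Int.mod s1 8, 24,
       PySem.Int.bor (s4 <<< (32 : Nat)) s3, PySem.Int.mod s2 12⟩])) (state1, [])).2

def recover_part1_password (student_id : String) : String :=
  let seed := compute_seed student_id
  let vault := generate_part1_vault seed
  let nodes := generate_part1_nodes seed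
  let out : List String := List.replicate nodes.length "?"
  let out := nodes.foldl (fun (o : List String) node =>
    if node.valid != 0 && node.contributes != 0 then
      -- out[node.position] = vault[node.row_index][node.col_val]  (indices in range)
      o.set node.position.toNat
        (PySem.List.pyGetD (PySem.List.pyGetD vault node.row_index []) node.col_val "?")
    else o) out
  PySem.Str.join "" out

-- ===== PORT B =====
def recover_part1_password_alt (student_id : String) : String :=
  let seed := compute_seed student_id
  let states := (PySem.List.pyRange 0 96 1).foldl
    (fun (sts : List Int) _ => sts ++ [lcg_next (PySem.List.pyGetD sts (-1) 0)]) [seed]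
  let length := 6 + PySem.Int.mod (PySem.List.pyGetD states 1 0) 5
  let chars := (PySem.List.pyRange 0 length 1).foldl (fun (cs : List String) k =>
    let row := PySem.Int.mod (PySem.List.pyGetD states (2 + 4 * k) 0) 8
    let col := PySem.Int.mod (PySem.List.pyGetD states (3 + 4 * k) 0) 12
    cs ++ [String.mk [Char.ofNat (65 +
      PySem.Int.mod (PySem.List.pyGetD states (row * 12 + col + 1) 0) 26).toNat]]) []
  PySem.Str.join "" chars

-- ===== PRECONDITION & SPEC =====
def Spec_recover_part1_password (student_id : String) (out : String) : Prop := out = recover_part1_password_alt student_id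
instance (student_id : String) (out : String) : Decidable (Spec_recover_part1_password student_id out) := by unfold Spec_recover_part1_password; infer_instance

-- ===== CLAIM (what is proved, stated in full; the proofs are below) =====
def Claim_equal_recover_part1_password : Prop := ∀ (student_id : String), Dom_recover_part1_password student_id → Spec_recover_part1_password student_id (recover_part1_password student_id)

-- ===== LEMMAS AND PROOFS =====

-- the single character drawn from an LCG state
def chrS (t : Int) : String := String.mk [Char.ofNat (65 + PySem.Int.mod t 26).toNat]

---------------------------------------------------------------- states

lemma pyGetD_last (zs : List Int) (y : Int) : PySem.List.pyGetD (zs ++ [y]) (-1) 0 = y := by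
  simp [PySem.List.pyGetD, PySem.List.pyGet?, PySem.List.pyIdx?]

lemma states_aux (l : List Int) : ∀ (zs : List Int) (y : Int),
    l.foldl (fun sts _ => sts ++ [lcg_next (PySem.List.pyGetD sts (-1) 0)]) (zs ++ [y])
      = zs ++ [y] ++ (List.range l.length).map (fun i => lcg_next^[i+1] y) := by
  induction l with
  | nil => intro zs y; simp
  | cons a l ih =>
      intro zs y
      simp only [List.foldl_cons, pyGetD_last]
      rw [show zs ++ [y] ++ [lcg_next y] = (zs ++ [y]) ++ [lcg_next y] from by simp]
      rw [ih (zs ++ [y]) (lcg_next y)]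
      simp [List.range_succ_eq_map, Function.iterate_succ_apply, List.map_map, Function.comp_def]

def statesRun (seed : Int) : List Int :=
  (PySem.List.pyRange 0 96 1).foldl
    (fun (sts : List Int) _ => sts ++ [lcg_next (PySem.List.pyGetD sts (-1) 0)]) [seed]

lemma states_run_eq (seed : Int) :
    statesRun seed = seed :: (List.range 96).map (fun i => lcg_next^[i+1] seed) := by
  have h := states_aux (PySem.List.pyRange 0 96 1) [] seed
  simpa [statesRun, PySem.List.length_pyRange_one] using h

lemma states_get (seed : Int) (n : Int) (h0 : 0 ≤ n) (h1 : n ≤ 96) :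
    PySem.List.pyGetD (statesRun seed) n 0 = lcg_next^[n.toNat] seed := by
  obtain ⟨m, rfl⟩ := Int.eq_ofNat_of_zero_le h0
  rw [PySem.List.pyGetD_natCast, states_run_eq, Int.toNat_natCast]
  cases m with
  | zero => rfl
  | succ k =>
      have hk : k < 96 := by omega
      rw [List.getD_cons_succ, PySem.List.getD_map_range _ _ _ _ hk]

---------------------------------------------------------------- vault

lemma pyGetD_set_read {α : Type} (v : List α) (r : Int) (x d : α)
    (h0 : 0 ≤ r) (h1 : r.toNat < v.length) :
    PySem.List.pyGetD (v.set r.toNat x) r d = x := by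
  rw [PySem.List.pyGetD_eq_getElem _ _ h0 (by simp only [List.length_set]; omega)]
  exact List.getElem_set_self _

lemma set_append_cons {α : Type} (xs : List α) : ∀ (b x : α) (t : List α),
    (xs ++ b :: t).set xs.length x = xs ++ x :: t := by
  induction xs with
  | nil => intro b x t; rfl
  | cons a l ih => intro b x t; simp [ih]

lemma set_append_cons_len {α : Type} (xs : List α) (b x : α) (t : List α) (n : Nat)
    (h : n = xs.length) : (xs ++ b :: t).set n x = xs ++ x :: t := by
  subst h; exact set_append_cons _ _ _ _

lemma set_at_take {α : Type} (l : List α) (c : Nat) (hc : c < l.length) (x b : α) :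
    (l.take c ++ [b]).set c x = l.take c ++ [x] := by
  have hlen : (l.take c).length = c := by rw [List.length_take]; omega
  calc (l.take c ++ [b]).set c x
      = (l.take c ++ [b]).set (l.take c).length x := by rw [hlen]
    _ = l.take c ++ [x] := set_append_cons _ _ _ _

lemma vault_inner (row : Int) (hr0 : 0 ≤ row) : ∀ (j c : Nat), c + j = 12 →
    ∀ (st : Int) (v : List (List String)), row.toNat < v.length →
      (PySem.List.pyGetD v row []).length = 12 →
    (PySem.List.pyRange (c : Int) 12 1).foldl (fun (acc2 : Int × List (List String)) col =>
      (lcg_next acc2.1, acc2.2.set row.toNat ((PySem.List.pyGetD acc2.2 row []).set col.toNat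
        (String.mk [Char.ofNat (65 + PySem.Int.mod (lcg_next acc2.1) 26).toNat])))) (st, v)
      = (lcg_next^[j] st,
         v.set row.toNat ((PySem.List.pyGetD v row []).take c
            ++ (List.range j).map (fun i => chrS (lcg_next^[i+1] st)))) := by
  intro j
  induction j with
  | zero =>
      intro c hc st v hlt hlen
      have hc12 : (c : Int) = 12 := by omega
      rw [hc12, PySem.List.pyRange_one_eq_nil (le_refl _)]
      simp only [List.foldl_nil, Function.iterate_zero, id_eq, List.range_zero, List.map_nil,
        List.append_nil]
      rw [List.take_of_length_le (by omega)]
      rw [PySem.List.pyGetD_eq_getElem _ _ hr0 (by omega)]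
      rw [List.set_getElem_self]
  | succ j ih =>
      intro c hc st v hlt hlen
      have hclt : (c : Int) < 12 := by omega
      rw [PySem.List.pyRange_one_cons hclt, List.foldl_cons]
      have hc1 : (c : Int) + 1 = ((c + 1 : Nat) : Int) := by push_cast; ring
      rw [hc1]
      rw [ih (c+1) (by omega) (lcg_next st) _
          (by simpa using hlt)
          (by rw [pyGetD_set_read _ _ _ _ hr0 hlt]; simpa using hlen)]
      rw [pyGetD_set_read _ _ _ _ hr0 hlt]
      simp only [List.set_set, Prod.mk.injEq, Int.toNat_natCast]
      constructor
      · exact (Function.iterate_succ_apply _ _ _).symm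
      · congr 1
        rw [List.take_set, List.take_succ, List.getElem?_eq_getElem (by omega),
            Option.toList_some, set_at_take _ _ (by omega)]
        simp [List.range_succ_eq_map, List.map_map, Function.comp_def, chrS,
              Function.iterate_succ_apply, List.append_assoc]

lemma chr_congr (st : Int) {a b : Nat} (h : a = b) :
    chrS (lcg_next^[a] st) = chrS (lcg_next^[b] st) := by rw [h]

lemma vault_outer : ∀ (i r : Nat), r + i = 8 →
    ∀ (st : Int) (v : List (List String)), v.length = 8 →
      (∀ x ∈ v, x.length = 12) →
    (PySem.List.pyRange (r : Int) 8 1).foldl (fun (acc : Int × List (List String)) row =>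
      (PySem.List.pyRange 0 12 1).foldl (fun (acc2 : Int × List (List String)) col =>
        (lcg_next acc2.1, acc2.2.set row.toNat ((PySem.List.pyGetD acc2.2 row []).set col.toNat
          (String.mk [Char.ofNat (65 + PySem.Int.mod (lcg_next acc2.1) 26).toNat])))) acc) (st, v)
      = (lcg_next^[12*i] st,
         v.take r ++ (List.range i).map (fun ρ =>
           (List.range 12).map (fun c => chrS (lcg_next^[12*ρ+c+1] st)))) := by
  intro i
  induction i with
  | zero =>
      intro r hr st v hlen _
      have hr8 : r = 8 := by omega
      subst hr8
      rw [show ((8:Nat) : Int) = 8 from rfl, PySem.List.pyRange_one_eq_nil (le_refl _)]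
      simp [List.take_of_length_le (le_of_eq hlen)]
  | succ i ih =>
      intro r hr st v hlen hrows
      have hrlt : (r : Int) < 8 := by omega
      rw [PySem.List.pyRange_one_cons hrlt, List.foldl_cons]
      have hrowlen : (PySem.List.pyGetD v (r : Int) []).length = 12 := by
        rw [PySem.List.pyGetD_eq_getElem _ _ (by positivity) (by exact_mod_cast by omega)]
        exact hrows _ (List.getElem_mem _)
      have hin := vault_inner (r : Int) (by positivity) 12 0 (by omega) st v
            (by simp only [Int.toNat_natCast]; omega) hrowlen
      simp only [Nat.cast_zero] at hin
      rw [hin]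
      simp only [List.take_zero, List.nil_append, Int.toNat_natCast]
      have hc1 : (r : Int) + 1 = ((r + 1 : Nat) : Int) := by push_cast; ring
      rw [hc1, ih (r+1) (by omega) (lcg_next^[12] st) _
          (by simp [hlen])
          (by intro x hx
              rcases List.mem_or_eq_of_mem_set hx with h' | h'
              · exact hrows _ h'
              · simp [h'])]
      simp only [Prod.mk.injEq]
      constructor
      · rw [show 12*(i+1) = 12*i+12 from by ring, Function.iterate_add_apply]
      · rw [List.take_set, List.take_succ, List.getElem?_eq_getElem (by omega),
            Option.toList_some, set_at_take _ _ (by omega)]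
        conv_rhs => rw [List.range_succ_eq_map (n := i)]
        rw [List.map_cons, List.map_map, List.append_assoc, List.singleton_append]
        apply congrArg
        rw [List.cons_eq_cons]
        constructor
        · apply List.map_congr_left; intro c _
          exact chr_congr st (by omega)
        · apply List.map_congr_left; intro ρ _
          simp only [Function.comp_def]
          apply List.map_congr_left; intro c _
          rw [← Function.iterate_add_apply]
          exact chr_congr st (by omega)

lemma vault_eq (seed : Int) :
    generate_part1_vault seed
      = (List.range 8).map (fun r => (List.range 12).map (fun c => chrS (lcg_next^[12*r+c+1] seed))) := by
  have h := vault_outer 8 0 (by omega) seed (List.replicate 8 (List.replicate 12 "?"))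
    (by simp) (by intro x hx; simp [List.eq_of_mem_replicate hx])
  simp only [Nat.cast_zero, List.take_zero, List.nil_append] at h
  simp only [generate_part1_vault]
  rw [h]

---------------------------------------------------------------- bridge

lemma bridge (seed : Int) (r c : Int) (hr0 : 0 ≤ r) (hr : r < 8) (hc0 : 0 ≤ c) (hc : c < 12) :
    PySem.List.pyGetD (PySem.List.pyGetD (generate_part1_vault seed) r []) c "?"
      = String.mk [Char.ofNat (65 + PySem.Int.mod (PySem.List.pyGetD (statesRun seed) (r * 12 + c + 1) 0) 26).toNat] := by
  rw [states_get seed _ (by omega) (by omega)]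
  obtain ⟨m, rfl⟩ := Int.eq_ofNat_of_zero_le hr0
  obtain ⟨k, rfl⟩ := Int.eq_ofNat_of_zero_le hc0
  have ht : ((m : Int) * 12 + (k : Int) + 1).toNat = 12 * m + k + 1 := by omega
  rw [ht, vault_eq]
  simp only [PySem.List.pyGetD_natCast]
  rw [PySem.List.getD_map_range _ _ _ _ (show m < 8 by omega),
      PySem.List.getD_map_range _ _ _ _ (show k < 12 by omega)]
  rfl

---------------------------------------------------------------- nodes / out (A side)

def mkN (seed : Int) (k : Nat) : Node :=
  ⟨1, 1, (k : Int), PySem.Int.mod (lcg_next^[4*k+2] seed) 8, 24,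
   PySem.Int.bor ((lcg_next^[4*k+5] seed) <<< (32 : Nat)) (lcg_next^[4*k+4] seed),
   PySem.Int.mod (lcg_next^[4*k+3] seed) 12⟩

lemma nodes_aux (seed : Int) : ∀ (n : Nat),
    (PySem.List.pyRange 0 (n : Int) 1).foldl (fun (acc : Int × List Node) index =>
      (lcg_next (lcg_next (lcg_next (lcg_next acc.1))),
       acc.2 ++ [⟨1, 1, index, PySem.Int.mod (lcg_next acc.1) 8, 24,
         PySem.Int.bor ((lcg_next (lcg_next (lcg_next (lcg_next acc.1)))) <<< (32 : Nat))
           (lcg_next (lcg_next (lcg_next acc.1))),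
         PySem.Int.mod (lcg_next (lcg_next acc.1)) 12⟩])) (lcg_next seed, [])
      = (lcg_next^[4*n+1] seed, (List.range n).map (mkN seed)) := by
  intro n
  induction n with
  | zero =>
      rw [show ((0:Nat) : Int) = 0 from rfl, PySem.List.pyRange_one_eq_nil (le_refl _)]
      simp
  | succ n ih =>
      have h1 : ((n + 1 : Nat) : Int) = (n : Int) + 1 := by push_cast; ring
      rw [h1, PySem.List.pyRange_one_succ_right (by positivity), List.foldl_append,
          ih, List.foldl_cons, List.foldl_nil]
      have hs' : ∀ (a b : Nat), a + 1 = b → lcg_next (lcg_next^[a] seed) = lcg_next^[b] seed := by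
        intro a b h; rw [← h, Function.iterate_succ_apply']
      rw [hs' (4*n+1) (4*n+2) (by ring), hs' (4*n+2) (4*n+3) (by ring),
          hs' (4*n+3) (4*n+4) (by ring), hs' (4*n+4) (4*n+5) (by ring),
          List.range_succ, List.map_append, List.map_singleton]
      simp only [mkN]
      rw [show 4*(n+1)+1 = 4*n+5 from by ring]

lemma nodes_eq (seed : Int) (n : Nat) (hn : 6 + PySem.Int.mod (lcg_next seed) 5 = (n : Int)) :
    generate_part1_nodes seed = (List.range n).map (mkN seed) := by
  simp only [generate_part1_nodes]
  rw [hn, nodes_aux seed n]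

lemma set_fold_aux (v : Nat → String) : ∀ (j m : Nat), j ≤ m →
    (List.range j).foldl (fun o k => o.set k (v k)) (List.replicate m "?")
      = (List.range j).map v ++ List.replicate (m - j) "?" := by
  intro j
  induction j with
  | zero => intro m _; simp
  | succ j ih =>
      intro m hm
      rw [List.range_succ, List.foldl_append, ih m (by omega), List.foldl_cons, List.foldl_nil]
      rw [List.map_append, List.map_singleton,
          show m - j = (m - (j+1)) + 1 from by omega, List.replicate_succ,
          set_append_cons_len _ _ _ _ _ (by simp)]
      simp

lemma set_fold (n : Nat) (v : Nat → String) :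
    (List.range n).foldl (fun o k => o.set k (v k)) (List.replicate n "?")
      = (List.range n).map v := by
  rw [set_fold_aux v n n (le_refl _)]
  simp

---------------------------------------------------------------- main

def aBody (seed : Int) : String :=
  let vault := generate_part1_vault seed
  let nodes := generate_part1_nodes seed
  let out : List String := List.replicate nodes.length "?"
  let out := nodes.foldl (fun (o : List String) node =>
    if node.valid != 0 && node.contributes != 0 then
      o.set node.position.toNat
        (PySem.List.pyGetD (PySem.List.pyGetD vault node.row_index []) node.col_val "?")
    else o) out
  PySem.Str.join "" out

def altBody (seed : Int) : String :=
  let states := statesRun seed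
  let length := 6 + PySem.Int.mod (PySem.List.pyGetD states 1 0) 5
  let chars := (PySem.List.pyRange 0 length 1).foldl (fun (cs : List String) k =>
    cs ++ [String.mk [Char.ofNat (65 +
      PySem.Int.mod (PySem.List.pyGetD states
        (PySem.Int.mod (PySem.List.pyGetD states (2 + 4 * k) 0) 8 * 12 +
         PySem.Int.mod (PySem.List.pyGetD states (3 + 4 * k) 0) 12 + 1) 0) 26).toNat]]) []
  PySem.Str.join "" chars

lemma portA_eq (s : String) : recover_part1_password s = aBody (compute_seed s) := rfl
lemma portB_eq (s : String) : recover_part1_password_alt s = altBody (compute_seed s) := rfl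

lemma main (seed : Int) : aBody seed = altBody seed := by
  have hmn := PySem.Int.mod_nonneg (lcg_next seed) (show (0:Int) < 5 by norm_num)
  have hml := PySem.Int.mod_lt (lcg_next seed) (show (0:Int) < 5 by norm_num)
  obtain ⟨n, hn⟩ : ∃ n : Nat, 6 + PySem.Int.mod (lcg_next seed) 5 = (n : Int) :=
    ⟨(6 + PySem.Int.mod (lcg_next seed) 5).toNat, by omega⟩
  have hn10 : n ≤ 10 := by omega
  -- A side
  simp only [aBody]
  rw [nodes_eq seed n hn]
  rw [List.foldl_map]
  simp only [mkN, List.length_map, List.length_range, Int.toNat_natCast,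
    show ((1:Int) != 0 && (1:Int) != 0) = true from rfl, if_true]
  rw [set_fold n (fun k => PySem.List.pyGetD (PySem.List.pyGetD (generate_part1_vault seed)
        (PySem.Int.mod (lcg_next^[4*k+2] seed) 8) [])
        (PySem.Int.mod (lcg_next^[4*k+3] seed) 12) "?")]
  -- B side
  simp only [altBody]
  rw [show PySem.List.pyGetD (statesRun seed) 1 0 = lcg_next seed from by
        have h := states_get seed 1 (by norm_num) (by norm_num)
        simpa using h]
  rw [hn, PySem.List.foldl_append_singleton_eq_map, List.nil_append, PySem.List.pyRange_one]
  simp only [Int.sub_zero, Int.toNat_natCast, List.map_map, Function.comp_def, Int.zero_add]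
  -- pointwise
  refine congrArg (PySem.Str.join "") ?_
  apply List.map_congr_left
  intro k hk
  have hkn : k < n := List.mem_range.mp hk
  rw [states_get seed (2 + 4 * (k : Int)) (by omega) (by omega),
      states_get seed (3 + 4 * (k : Int)) (by omega) (by omega),
      show ((2 : Int) + 4 * (k : Int)).toNat = 4*k+2 from by omega,
      show ((3 : Int) + 4 * (k : Int)).toNat = 4*k+3 from by omega]
  rw [bridge seed _ _
      (PySem.Int.mod_nonneg _ (by norm_num)) (PySem.Int.mod_lt _ (by norm_num))
      (PySem.Int.mod_nonneg _ (by norm_num)) (PySem.Int.mod_lt _ (by norm_num))]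

-- ===== VERDICT (by name: the statement is the Claim_ definition above) =====
theorem recover_part1_password_spec : Claim_equal_recover_part1_password := by
  intro s _
  unfold Spec_recover_part1_password
  rw [portA_eq, portB_eq, main]
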